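-- pv_equiv track=rewrite | github.com/emczg/corsort | corsort/merge_insertion_sort.py | binary_search_insertion
-- ===== SOURCE A (Python) =====
-- def binary_search_insertion(sorted_list, item, nc):
--     """
--     Insert an_ item in a sorted list by binary search.
--
--     Parameters
--     ----------
--     sorted_list: :class:`list`
--         A sorted list.
--     item: int
--         The item to insert.
--     nc: :class:`list`
--         A one-element list with the number of comparisons (to update).
--
--     Returns
--     -------
--     :class:`list`
--         The sorted list with the inserted item.
--
--     Examples
--     --------
--         >>> my_nc = [0]
--         >>> binary_search_insertion([1, 12, 45, 51, 69, 99], 42, my_nc)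
--         [1, 12, 42, 45, 51, 69, 99]
--         >>> my_nc[0]
--         3
--     """
--     left = 0
--     right = len(sorted_list) - 1
--     while left <= right:
--         middle = (left + right) // 2
--         if left == right:
--             nc[0] += 1
--             if sorted_list[middle] < item:
--                 left = middle + 1
--             break
--         else:
--             nc[0] += 1
--             if sorted_list[middle] < item:
--                 left = middle + 1
--             else:
--                 right = middle - 1
--     sorted_list.insert(left, item)
--     return sorted_list
-- ===== SOURCE B (Python) =====
-- def binary_search_insertion(sorted_list, item, nc):
--     def search(seg):
--         # returns (insertion index within seg, number of comparisons)
--         if not seg: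
--             return 0, 0
--         k = (len(seg) - 1) // 2
--         if seg[k] < item:
--             i, c = search(seg[k + 1:])
--             return k + 1 + i, c + 1
--         else:
--             i, c = search(seg[:k])
--             return i, c + 1
--     idx, cnt = search(sorted_list)
--     nc[0] += cnt
--     sorted_list.insert(idx, item)
--     return sorted_list
-- ===== Notes on version B (the rewrite author's own statement) =====
-- stated objective: alternative
-- what changed: Replaced A's index-based while-loop over (left, right) bounds by a divide-and-conquer recursion on list segments (slicing off half each call) that returns the insertion index and comparison count as a pair, then applies nc[0] += count and one insert.
-- outside the precondition, e.g. on binary_search_insertion([], 0, []): A returns [0], B raises IndexError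
import Mathlib
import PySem

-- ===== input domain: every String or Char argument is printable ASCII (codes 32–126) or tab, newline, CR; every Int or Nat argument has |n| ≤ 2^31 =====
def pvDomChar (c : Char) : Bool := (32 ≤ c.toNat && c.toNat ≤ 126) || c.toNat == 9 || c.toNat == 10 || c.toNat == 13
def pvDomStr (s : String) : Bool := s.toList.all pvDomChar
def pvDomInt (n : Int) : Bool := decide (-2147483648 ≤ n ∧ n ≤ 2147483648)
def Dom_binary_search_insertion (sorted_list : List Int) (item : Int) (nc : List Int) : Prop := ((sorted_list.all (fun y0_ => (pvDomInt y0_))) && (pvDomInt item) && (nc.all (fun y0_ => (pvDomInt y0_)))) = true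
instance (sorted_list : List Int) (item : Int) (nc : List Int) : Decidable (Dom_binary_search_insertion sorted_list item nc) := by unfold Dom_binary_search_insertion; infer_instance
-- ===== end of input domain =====

-- B replaces A's index-based while-loop by a divide-and-conquer recursion on list SEGMENTS
-- (slicing off half of the list each call) that returns the insertion index and comparison
-- count as a pair; objective: alternative. Both Pythons mutate sorted_list and nc[0] in place
-- identically; the equivalence proved here is about the RETURN value, which does not depend
-- on nc (nc only receives the comparison count as a side effect).

-- ===== PORT A =====
-- A's while-loop: state (left, right); `break` is modelled by returning the final `left`.
-- sorted_list[middle] is always in range inside the loop (0 ≤ left ≤ middle ≤ right < len),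
-- so pyGetD with default 0 is exact here.
def pvLoopA (s : List Int) (item : Int) (left right : Int) : Int :=
  if _h : left ≤ right then
    let middle := PySem.Int.floordiv (left + right) 2
    if left = right then
      -- nc[0] += 1 : side effect on nc, no influence on the return value
      if PySem.List.pyGetD s middle 0 < item then middle + 1 else left
    else
      if PySem.List.pyGetD s middle 0 < item then pvLoopA s item (middle + 1) right
      else pvLoopA s item left (middle - 1)
  else left
termination_by (right + 1 - left).toNat
decreasing_by
  · have hb := PySem.Int.floordiv_two_mid_bounds _h
    omega
  · have hb := PySem.Int.floordiv_two_mid_bounds _h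
    omega

def binary_search_insertion (sorted_list : List Int) (item : Int) (nc : List Int) : List Int :=
  PySem.List.insert sorted_list (pvLoopA sorted_list item 0 (sorted_list.length - 1)) item

-- ===== PORT B =====
-- B's helper search(seg): (insertion index within seg, number of comparisons), recursing on
-- the slices seg[k+1:] / seg[:k]. In the else-branch len(seg) ≥ 1, so Python's
-- (len(seg)-1)//2 is exactly Nat division (len(seg)-1)/2; seg[k] with 0 ≤ k < len(seg) is
-- exact as pyGetD with default 0.
def pvSearchB (item : Int) (seg : List Int) : Int × Int :=
  if _h : seg = [] then (0, 0)
  else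
    let k : Nat := (seg.length - 1) / 2
    if PySem.List.pyGetD seg (k : Int) 0 < item then
      let p := pvSearchB item (PySem.List.slice seg (some ((k : Int) + 1)) none)
      ((k : Int) + 1 + p.1, p.2 + 1)
    else
      let p := pvSearchB item (PySem.List.slice seg none (some (k : Int)))
      (p.1, p.2 + 1)
termination_by seg.length
decreasing_by
  · have : ((k : Int) + 1) = ((k + 1 : Nat) : Int) := by push_cast; ring
    rw [this, PySem.List.slice_from_natCast]
    have hlen : 0 < seg.length := List.length_pos_iff.mpr _h
    simp [List.length_drop]
    omega
  · rw [PySem.List.slice_to_natCast]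
    have hlen : 0 < seg.length := List.length_pos_iff.mpr _h
    simp [List.length_take]
    omega

def binary_search_insertion_alt (sorted_list : List Int) (item : Int) (nc : List Int) : List Int :=
  -- nc[0] += cnt : side effect on nc, no influence on the return value
  PySem.List.insert sorted_list (pvSearchB item sorted_list).1 item

-- ===== PRECONDITION & SPEC =====
-- Pre_ excludes only inputs where a program raises: with nc = [], A raises IndexError on
-- `nc[0] += 1` whenever sorted_list is nonempty, and B's own `nc[0] += cnt` raises IndexError
-- even for empty sorted_list, so all nc = [] inputs are excluded.
def Pre_binary_search_insertion (sorted_list : List Int) (item : Int) (nc : List Int) : Prop :=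
  nc ≠ []
instance (sorted_list : List Int) (item : Int) (nc : List Int) : Decidable (Pre_binary_search_insertion sorted_list item nc) := by unfold Pre_binary_search_insertion; infer_instance
def pvWitness_binary_search_insertion : List Int × Int × List Int := ([1, 12, 45, 51, 69, 99], 42, [0])

def Spec_binary_search_insertion (sorted_list : List Int) (item : Int) (nc : List Int) (out : List Int) : Prop := out = binary_search_insertion_alt sorted_list item nc
instance (sorted_list : List Int) (item : Int) (nc : List Int) (out : List Int) : Decidable (Spec_binary_search_insertion sorted_list item nc out) := by unfold Spec_binary_search_insertion; infer_instance

-- ===== CLAIM (what is proved, stated in full; the proofs are below) =====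
def Claim_equal_binary_search_insertion : Prop := ∀ (sorted_list : List Int) (item : Int) (nc : List Int), Dom_binary_search_insertion sorted_list item nc → Pre_binary_search_insertion sorted_list item nc → Spec_binary_search_insertion sorted_list item nc (binary_search_insertion sorted_list item nc)

-- ===== LEMMAS AND PROOFS =====

-- A's loop on [l, r] computes l plus B's insertion index on the segment s[l : r+1],
-- by strong induction on the segment length n = r + 1 - l.
theorem pvLoopA_eq_searchB (s : List Int) (item : Int) :
    ∀ (n : Nat) (l r : Int), 0 ≤ l → r < s.length → (r + 1 - l).toNat = n →
      pvLoopA s item l r = l + (pvSearchB item ((s.drop l.toNat).take n)).1 := by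
  intro n
  induction n using Nat.strong_induction_on with
  | _ n ih =>
    intro l r hl hr hn
    by_cases hlr : l ≤ r
    · have hn1 : 1 ≤ n := by omega
      have hsl : ((s.drop l.toNat).take n).length = n := by
        simp [List.length_take, List.length_drop]; omega
      have hne : (s.drop l.toNat).take n ≠ [] := by
        intro h0; rw [h0] at hsl; simp at hsl; omega
      rw [pvLoopA, pvSearchB, dif_pos hlr, dif_neg hne]
      simp only [hsl]
      set k : Nat := (n - 1) / 2 with hk
      have hkb : 2 * k ≤ n - 1 ∧ n - 1 < 2 * k + 2 := by omega
      have hmid : PySem.Int.floordiv (l + r) 2 = l + k := by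
        rw [PySem.Int.floordiv_eq_iff_of_pos (by omega)]; omega
      have hkn : k < n := by omega
      have hget : PySem.List.pyGetD ((s.drop l.toNat).take n) ((k : Nat) : Int) 0
          = PySem.List.pyGetD s (l + (k : Nat)) 0 := by
        have h1 : (l + ((k : Nat) : Int)) = ((l.toNat + k : Nat) : Int) := by omega
        rw [h1, PySem.List.pyGetD_natCast, PySem.List.pyGetD_natCast]
        rw [List.getD_eq_getElem _ _ (by rw [hsl]; omega),
            List.getD_eq_getElem _ _ (by omega)]
        rw [List.getElem_take, List.getElem_drop]
      rw [hmid, hget]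
      by_cases hc : PySem.List.pyGetD s (l + (k : Nat)) 0 < item
      · rw [if_pos hc]
        by_cases heq : l = r
        · have hn1' : n = 1 := by omega
          have hk0 : k = 0 := by omega
          have hnil : PySem.List.slice ((s.drop l.toNat).take n) (some (((k : Nat) : Int) + 1)) none = [] := by
            have h1 : (((k : Nat) : Int) + 1) = ((k + 1 : Nat) : Int) := by push_cast; ring
            rw [h1, PySem.List.slice_from_natCast]
            apply List.eq_nil_of_length_eq_zero
            simp [List.length_drop, hsl]; omega
          rw [if_pos heq, if_pos hc, hnil, pvSearchB]
          simp [hk0]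
        · rw [if_neg heq, if_pos hc, if_pos hc]
          have hslice : PySem.List.slice ((s.drop l.toNat).take n) (some (((k : Nat) : Int) + 1)) none
              = (s.drop (l + (k : Nat) + 1).toNat).take (n - (k + 1)) := by
            have h1 : (((k : Nat) : Int) + 1) = ((k + 1 : Nat) : Int) := by push_cast; ring
            rw [h1, PySem.List.slice_from_natCast, List.drop_take, List.drop_drop]
            congr 2
            omega
          have hrec := ih (n - (k + 1)) (by omega) (l + (k : Nat) + 1) r (by omega) hr (by omega)
          rw [hslice, hrec]
          omega
      · rw [if_neg hc]
        by_cases heq : l = r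
        · have hk0 : k = 0 := by omega
          have hnil : PySem.List.slice ((s.drop l.toNat).take n) none (some ((k : Nat) : Int)) = [] := by
            rw [PySem.List.slice_to_natCast, hk0]; simp
          rw [if_pos heq, if_neg hc, hnil, pvSearchB]
          simp
        · rw [if_neg heq, if_neg hc, if_neg hc]
          have hslice : PySem.List.slice ((s.drop l.toNat).take n) none (some ((k : Nat) : Int))
              = (s.drop l.toNat).take k := by
            rw [PySem.List.slice_to_natCast, List.take_take]
            congr 1
            omega
          have hrec := ih k (by omega) l (l + (k : Nat) - 1) hl (by omega) (by omega)
          rw [hslice, hrec]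
    · have hn0 : n = 0 := by omega
      subst hn0
      rw [pvLoopA, pvSearchB]
      simp [hlr]

-- ===== VERDICT (by name: the statement is the Claim_ definition above) =====
theorem binary_search_insertion_spec : Claim_equal_binary_search_insertion := by
  intro sorted_list item nc _ _
  unfold Spec_binary_search_insertion binary_search_insertion binary_search_insertion_alt
  have h := pvLoopA_eq_searchB sorted_list item sorted_list.length 0 (sorted_list.length - 1)
    le_rfl (by omega) (by omega)
  simp at h
  rw [h]
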